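-- pv_equiv track=rewrite | github.com/pritamleo841/GFG-CODE-SOLUTIONS-PYTHON | Difficulty: Easy/Sum of dependencies in a graph/sum-of-dependencies-in-a-graph.py | sumOfDependencies
-- ===== SOURCE A (Python) =====
-- def sumOfDependencies(V,edges):
--     # code here
--
--     #Idea is to check adjacency list
--     #and find how many edges are there from each vertex
--     #and return the total number of edges.
--
--     adjList = [[] for i in range(V)]
--     for u,v in edges:
--         adjList[u].append(v)
--
--     num = 0
--     for u in range(V):
--         num+=len(adjList[u])
--     return num
-- ===== SOURCE B (Python) =====
-- def sumOfDependencies(V, edges):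
--     # Sum of out-degrees over all vertices = total number of edges.
--     return len(edges)
-- ===== Notes on version B (the rewrite author's own statement) =====
-- stated objective: faster
-- what changed: Replaces building an adjacency list and summing per-vertex out-degrees with returning len(edges) directly (each edge contributes exactly one out-degree).
import Mathlib
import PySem

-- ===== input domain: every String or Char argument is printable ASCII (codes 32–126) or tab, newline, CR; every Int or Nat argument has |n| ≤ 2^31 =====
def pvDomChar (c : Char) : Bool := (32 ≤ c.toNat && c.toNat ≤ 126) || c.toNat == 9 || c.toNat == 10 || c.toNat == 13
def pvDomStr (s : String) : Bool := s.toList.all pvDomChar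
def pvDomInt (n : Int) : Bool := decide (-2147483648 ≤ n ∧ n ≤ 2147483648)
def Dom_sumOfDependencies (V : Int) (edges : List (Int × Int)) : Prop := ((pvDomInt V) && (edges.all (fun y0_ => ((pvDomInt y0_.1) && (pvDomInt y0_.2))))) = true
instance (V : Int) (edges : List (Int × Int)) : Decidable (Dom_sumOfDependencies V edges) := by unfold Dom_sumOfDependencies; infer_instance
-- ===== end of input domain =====

-- B replaces A's adjacency-list construction and out-degree summation with 'len(edges)' (O(1)); return-value equivalence only.

-- ===== PORT A =====
-- adjList[u].append(v): Python resolves a negative index against len(adjList); exact for indices in range (Pre_), out-of-range would raise IndexError in Python (excluded by Pre_).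
def sumOfDependencies (V : Int) (edges : List (Int × Int)) : Int :=
  let adjList0 : List (List Int) := List.replicate V.toNat []
  let adjList : List (List Int) := edges.foldl (fun acc p =>
    let i : Int := if p.1 < 0 then p.1 + (acc.length : Int) else p.1
    acc.set i.toNat ((acc[i.toNat]?.getD []) ++ [p.2])) adjList0
  (PySem.List.pyRange 0 V 1).foldl (fun num u => num + ((PySem.List.pyGetD adjList u []).length : Int)) 0

-- ===== PORT B =====
def sumOfDependencies_alt (V : Int) (edges : List (Int × Int)) : Int :=
  (edges.length : Int)

-- ===== PRECONDITION & SPEC =====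
-- Pre_ excludes exactly the inputs where A raises IndexError: a source vertex outside [-V, V).
def Pre_sumOfDependencies (V : Int) (edges : List (Int × Int)) : Prop :=
  0 ≤ V ∧ ∀ p ∈ edges, -V ≤ p.1 ∧ p.1 < V
instance (V : Int) (edges : List (Int × Int)) : Decidable (Pre_sumOfDependencies V edges) := by unfold Pre_sumOfDependencies; infer_instance

def pvWitness_sumOfDependencies : Int × (List (Int × Int)) := (3, [(0, 1), (1, 2), (-1, 0)])

def Spec_sumOfDependencies (V : Int) (edges : List (Int × Int)) (out : Int) : Prop := out = sumOfDependencies_alt V edges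
instance (V : Int) (edges : List (Int × Int)) (out : Int) : Decidable (Spec_sumOfDependencies V edges out) := by unfold Spec_sumOfDependencies; infer_instance

-- ===== CLAIM (what is proved, stated in full; the proofs are below) =====
def Claim_equal_sumOfDependencies : Prop := ∀ (V : Int) (edges : List (Int × Int)), Dom_sumOfDependencies V edges → Pre_sumOfDependencies V edges → Spec_sumOfDependencies V edges (sumOfDependencies V edges)

-- ===== LEMMAS AND PROOFS =====

-- total length of the inner lists, as an Int
def pvTotLen (l : List (List Int)) : Int := (l.map (fun x => (x.length : Int))).sum

theorem pvTotLen_set (l : List (List Int)) (i : Nat) (v : Int) (hi : i < l.length) :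
    pvTotLen (l.set i ((l[i]?.getD []) ++ [v])) = pvTotLen l + 1 := by
  induction l generalizing i with
  | nil => simp at hi
  | cons a t ih =>
    cases i with
    | zero => simp [pvTotLen]; omega
    | succ j =>
      simp only [List.set, List.getElem?_cons_succ]
      have := ih j (by simpa using hi)
      simp only [pvTotLen, List.map_cons, List.sum_cons] at this ⊢
      omega

theorem pvStep_totLen (V : Int) (edges : List (Int × Int)) (acc : List (List Int))
    (hlen : acc.length = V.toNat) (hV : 0 ≤ V)
    (hpre : ∀ p ∈ edges, -V ≤ p.1 ∧ p.1 < V) :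
    pvTotLen (edges.foldl (fun acc p =>
      let i : Int := if p.1 < 0 then p.1 + (acc.length : Int) else p.1
      acc.set i.toNat ((acc[i.toNat]?.getD []) ++ [p.2])) acc)
      = pvTotLen acc + edges.length ∧
    (edges.foldl (fun acc p =>
      let i : Int := if p.1 < 0 then p.1 + (acc.length : Int) else p.1
      acc.set i.toNat ((acc[i.toNat]?.getD []) ++ [p.2])) acc).length = V.toNat := by
  induction edges generalizing acc with
  | nil => exact ⟨by simp, hlen⟩
  | cons p t ih =>
    have hp := hpre p (List.mem_cons_self)
    have hacc : (acc.length : Int) = V := by rw [hlen]; exact_mod_cast Int.toNat_of_nonneg hV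
    set i : Int := if p.1 < 0 then p.1 + (acc.length : Int) else p.1 with hidef
    have hi : i.toNat < acc.length := by
      have h0 : 0 ≤ i := by rw [hidef]; split <;> omega
      have h1 : i < (acc.length : Int) := by rw [hidef]; split <;> omega
      omega
    have hset := pvTotLen_set acc i.toNat p.2 hi
    have hlen' : (acc.set i.toNat ((acc[i.toNat]?.getD []) ++ [p.2])).length = V.toNat := by
      simpa using hlen
    have := ih _ hlen' (fun q hq => hpre q (List.mem_cons_of_mem _ hq))
    simp only [List.foldl_cons]
    constructor
    · rw [this.1, hset]; simp; omega
    · exact this.2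

theorem pvFoldl_len_sum (l : List (List Int)) :
    l.foldl (fun num x => num + (x.length : Int)) 0 = pvTotLen l := by
  have : ∀ (init : Int), l.foldl (fun num x => num + (x.length : Int)) init = init + pvTotLen l := by
    induction l with
    | nil => intro init; simp [pvTotLen]
    | cons a t ih =>
      intro init
      simp only [List.foldl_cons, ih, pvTotLen, List.map_cons, List.sum_cons]
      ring
  simpa using this 0

theorem pvTotLen_replicate (n : Nat) : pvTotLen (List.replicate n ([] : List Int)) = 0 := by
  simp [pvTotLen]

-- ===== VERDICT (by name: the statement is the Claim_ definition above) =====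
theorem sumOfDependencies_spec : Claim_equal_sumOfDependencies := by
  intro V edges _ hpre
  obtain ⟨hV, hedges⟩ := hpre
  unfold Spec_sumOfDependencies sumOfDependencies sumOfDependencies_alt
  simp only []
  have hmain := pvStep_totLen V edges (List.replicate V.toNat []) (by simp) hV hedges
  set adjList := edges.foldl (fun acc p =>
      let i : Int := if p.1 < 0 then p.1 + (acc.length : Int) else p.1
      acc.set i.toNat ((acc[i.toNat]?.getD []) ++ [p.2])) (List.replicate V.toNat []) with hadj
  have hVlen : V = ((adjList.length : Nat) : Int) := by
    rw [hmain.2]; exact (Int.toNat_of_nonneg hV).symm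
  rw [hVlen]
  rw [PySem.List.foldl_pyRange_zero_pyGetD' adjList [] (fun num x => num + (x.length : Int)) 0]
  rw [pvFoldl_len_sum, hmain.1, pvTotLen_replicate]
  simp
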